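-- pv_equiv track=rewrite | github.com/damon-murdoch/palworld-coverage-calculator | python/data/types.py | get_weaknesses
-- ===== SOURCE A (Python) =====
-- TYPES = {
--     "water": ["fire"],
--     "fire": ["grass", "ice"],
--     "grass": ["ground"],
--     "ground": ["electric"],
--     "electric": ["water"],
--     "ice": ["dragon"],
--     "dragon": ["dark"],
--     "dark": ["neutral"],
--     "neutral": [],
-- }
--
-- def get_type_weaknesses(type):
--     weaknesses = []
--     for otherType in TYPES:
--         if type in TYPES[otherType]:
--             weaknesses.append(otherType)
--     return weaknesses
--
-- def get_weaknesses(types: [str]):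
--     weaknesses = {}
--     for type in types:
--         type_weaknesses = get_type_weaknesses(type)
--         for type_weakness in type_weaknesses:
--             if type_weakness in weaknesses:
--                 weaknesses[type_weakness] += 1
--             else:
--                 weaknesses[type_weakness] = 1
--     return weaknesses
-- ===== SOURCE B (Python) =====
-- TYPES = {
--     "water": ["fire"],
--     "fire": ["grass", "ice"],
--     "grass": ["ground"],
--     "ground": ["electric"],
--     "electric": ["water"],
--     "ice": ["dragon"],
--     "dragon": ["dark"],
--     "dark": ["neutral"],
--     "neutral": [],
-- }
--
-- # Reverse index built once: maps a type to the list of types it is weak to.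
-- _WEAK_INDEX = {}
-- for _other, _targets in TYPES.items():
--     for _t in _targets:
--         _WEAK_INDEX.setdefault(_t, []).append(_other)
--
-- def get_weaknesses(types: [str]):
--     weaknesses = {}
--     for type in types:
--         for w in _WEAK_INDEX.get(type, []):
--             weaknesses[w] = weaknesses.get(w, 0) + 1
--     return weaknesses
-- ===== Notes on version B (the rewrite author's own statement) =====
-- stated objective: simpler
-- what changed: B precomputes a reverse index from the TYPES chart once and then does a single pass over the input with direct lookups, eliminating the get_type_weaknesses helper's full scan of TYPES per input element.
import Mathlib
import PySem

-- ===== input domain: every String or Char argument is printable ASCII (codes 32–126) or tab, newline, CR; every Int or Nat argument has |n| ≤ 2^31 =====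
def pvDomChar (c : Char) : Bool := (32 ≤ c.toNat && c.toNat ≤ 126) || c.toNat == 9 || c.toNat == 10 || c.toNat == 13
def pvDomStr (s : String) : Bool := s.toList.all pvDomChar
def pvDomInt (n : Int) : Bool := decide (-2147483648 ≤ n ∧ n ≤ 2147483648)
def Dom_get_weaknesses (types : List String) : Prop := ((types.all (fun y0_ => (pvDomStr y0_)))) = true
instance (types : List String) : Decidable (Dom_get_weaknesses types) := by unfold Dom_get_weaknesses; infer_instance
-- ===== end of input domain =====

-- B replaces A's per-element scan of the TYPES chart by a one-time reverse index with direct lookups (objective: simpler).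

-- ===== PORT A =====
-- module constant TYPES (insertion order as in the Python source)
def pvTYPES : List (String × List String) :=
  [("water", ["fire"]), ("fire", ["grass", "ice"]), ("grass", ["ground"]),
   ("ground", ["electric"]), ("electric", ["water"]), ("ice", ["dragon"]),
   ("dragon", ["dark"]), ("dark", ["neutral"]), ("neutral", [])]

-- helper get_type_weaknesses: scan all of TYPES, collect keys whose value list contains type
def get_type_weaknesses (type_ : String) : List String :=
  pvTYPES.foldl (fun acc kv => if kv.2.contains type_ then acc ++ [kv.1] else acc) []

def get_weaknesses (types : List String) : List (String × Int) :=
  (types.foldl (fun weaknesses type_ =>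
      (get_type_weaknesses type_).foldl (fun w tw =>
        match PySem.Dict.get? w tw with
        | some v => PySem.Dict.insert w tw (v + 1)
        | none   => PySem.Dict.insert w tw (1 : Int)) weaknesses)
    PySem.Dict.empty).items

-- ===== PORT B =====
-- reverse index built once from pvTYPES (module-level loop with setdefault/append)
def pvWeakIndex : PySem.Dict String (List String) :=
  pvTYPES.foldl (fun idx kv =>
    kv.2.foldl (fun idx t =>
      PySem.Dict.insert idx t (PySem.Dict.getD idx t [] ++ [kv.1])) idx)
    PySem.Dict.empty

def get_weaknesses_alt (types : List String) : List (String × Int) :=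
  (types.foldl (fun weaknesses type_ =>
      (PySem.Dict.getD pvWeakIndex type_ []).foldl (fun w wk =>
        PySem.Dict.insert w wk (PySem.Dict.getD w wk 0 + 1)) weaknesses)
    PySem.Dict.empty).items

-- ===== PRECONDITION & SPEC =====
def Spec_get_weaknesses (types : List String) (out : List (String × Int)) : Prop := out = get_weaknesses_alt types
instance (types : List String) (out : List (String × Int)) : Decidable (Spec_get_weaknesses types out) := by unfold Spec_get_weaknesses; infer_instance

-- ===== CLAIM (what is proved, stated in full; the proofs are below) =====
def Claim_equal_get_weaknesses : Prop := ∀ (types : List String), Dom_get_weaknesses types → Spec_get_weaknesses types (get_weaknesses types)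

-- ===== LEMMAS AND PROOFS =====

-- the reverse index evaluated to its literal items
theorem pvWeakIndex_eval :
    pvWeakIndex = PySem.Dict.mk
      [("fire", ["water"]), ("grass", ["fire"]), ("ice", ["fire"]), ("ground", ["grass"]),
       ("electric", ["ground"]), ("water", ["electric"]), ("dragon", ["ice"]),
       ("dark", ["dragon"]), ("neutral", ["dark"])] := by decide

-- A's helper scan equals B's reverse-index lookup, for every string
theorem gtw_eq_index (t : String) :
    get_type_weaknesses t = PySem.Dict.getD pvWeakIndex t [] := by
  by_cases h1 : t = "fire"
  · subst h1; decide
  by_cases h2 : t = "grass"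
  · subst h2; decide
  by_cases h3 : t = "ice"
  · subst h3; decide
  by_cases h4 : t = "ground"
  · subst h4; decide
  by_cases h5 : t = "electric"
  · subst h5; decide
  by_cases h6 : t = "water"
  · subst h6; decide
  by_cases h7 : t = "dragon"
  · subst h7; decide
  by_cases h8 : t = "dark"
  · subst h8; decide
  by_cases h9 : t = "neutral"
  · subst h9; decide
  simp [get_type_weaknesses, pvTYPES, pvWeakIndex_eval, PySem.Dict.getD_eq_get?_getD,
    PySem.Dict.get?_mk_cons, h1, h2, h3, h4, h5, h6, h7, h8, h9,
    Ne.symm h1, Ne.symm h2, Ne.symm h3, Ne.symm h4, Ne.symm h5, Ne.symm h6, Ne.symm h7,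
    Ne.symm h8, Ne.symm h9]
  rfl

-- A's branching update equals B's get-then-insert, for every dict/key
theorem step_eq (w : PySem.Dict String Int) (k : String) :
    (match PySem.Dict.get? w k with
     | some v => PySem.Dict.insert w k (v + 1)
     | none   => PySem.Dict.insert w k 1) =
    PySem.Dict.insert w k (PySem.Dict.getD w k 0 + 1) := by
  rcases h : PySem.Dict.get? w k with _ | v <;>
    simp [PySem.Dict.getD_eq_get?_getD, h]

-- ===== VERDICT (by name: the statement is the Claim_ definition above) =====
theorem get_weaknesses_spec : Claim_equal_get_weaknesses := by
  intro types _
  unfold Spec_get_weaknesses get_weaknesses get_weaknesses_alt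
  congr 1
  apply PySem.List.foldl_congr_mem
  intro w t _
  rw [gtw_eq_index]
  apply PySem.List.foldl_congr_mem
  intro a b _
  exact step_eq a b
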